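-- pv_equiv track=rewrite | github.com/wertepure/Vabamorfi-hindamine | UD Vabamorfiks teisendamine/est_ud_morph_conv_new.py | _clean_lemma
-- ===== SOURCE A (Python) =====
-- def _clean_lemma( lemma ):
--     '''Removes '=' symbols from lemma if they appear between letters.'''
--     new_lemma = []
--     for i in range(len(lemma)):
--         last_c = lemma[i-1] if i-1>-1 else ''
--         c = lemma[i]
--         next_c = lemma[i+1] if i+1<len(lemma) else ''
--         if c == '=':
--             if not(last_c.isalpha() and next_c.isalpha()):
--                 new_lemma.append( c )
--         else:
--             new_lemma.append( c )
--     return ''.join(new_lemma)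
-- ===== SOURCE B (Python) =====
-- def _clean_lemma(lemma):
--     '''Removes '=' symbols from lemma if they appear between letters.'''
--     parts = lemma.split('=')
--     out = [parts[0]]
--     prev = parts[0]
--     for seg in parts[1:]:
--         if prev and prev[-1].isalpha() and seg and seg[0].isalpha():
--             out.append(seg)
--         else:
--             out.append('=' + seg)
--         prev = seg
--     return ''.join(out)
-- ===== Notes on version B (the rewrite author's own statement) =====
-- stated objective: faster
-- what changed: Replaces the per-character loop that inspects both neighbours of every position with splitting the lemma at the separator symbol and reassembling it, deciding each boundary from the last character of the previous segment and the first character of the next.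
import Mathlib
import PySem

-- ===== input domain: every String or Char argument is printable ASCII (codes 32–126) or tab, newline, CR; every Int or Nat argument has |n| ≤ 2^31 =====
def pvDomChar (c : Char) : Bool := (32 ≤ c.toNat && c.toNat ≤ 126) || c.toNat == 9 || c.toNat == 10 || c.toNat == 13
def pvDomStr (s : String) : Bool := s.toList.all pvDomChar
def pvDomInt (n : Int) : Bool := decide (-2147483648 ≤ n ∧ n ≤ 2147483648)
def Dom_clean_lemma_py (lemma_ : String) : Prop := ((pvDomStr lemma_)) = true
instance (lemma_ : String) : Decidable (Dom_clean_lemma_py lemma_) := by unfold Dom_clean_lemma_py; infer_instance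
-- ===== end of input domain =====

-- B replaces A's per-character neighbour scan by split('=') followed by a reassembly that
-- decides each '=' boundary from the adjacent segments (measurably faster in Python, same O(n)).

-- ===== PORT A =====
-- the loop 'for i in range(len(lemma))' as index recursion; last_c/next_c are the 0/1-char strings
def clean_lemma_py_loop (cs : List Char) (i : Nat) (acc : List Char) : List Char :=
  if h : i < cs.length then
    let last_c : List Char :=
      if (i : Int) - 1 > -1 then [PySem.List.pyGetD cs ((i : Int) - 1) ' '] else []
    let c : Char := PySem.List.pyGetD cs (i : Int) ' '
    let next_c : List Char :=
      if (i : Int) + 1 < (cs.length : Int) then [PySem.List.pyGetD cs ((i : Int) + 1) ' '] else []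
    let acc' : List Char :=
      if c = '=' then
        (if !(PySem.Chars.strIsalpha last_c && PySem.Chars.strIsalpha next_c) then acc ++ [c] else acc)
      else acc ++ [c]
    clean_lemma_py_loop cs (i + 1) acc'
  else acc
termination_by cs.length - i

def clean_lemma_py (lemma_ : String) : String :=
  String.mk (clean_lemma_py_loop lemma_.toList 0 [])

-- ===== PORT B =====
-- Source B's tests 'prev and prev[-1].isalpha()' / 'seg and seg[0].isalpha()'
def bLastAlpha (s : List Char) : Bool := s.getLast?.elim false PySem.Chars.isalpha
def bHeadAlpha (s : List Char) : Bool := s.head?.elim false PySem.Chars.isalpha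

-- lemma.split('=') ported as List.splitOn '=' (exact for a one-char separator)
def clean_lemma_py_alt (lemma_ : String) : String :=
  match lemma_.toList.splitOn '=' with
  | [] => ""  -- unreachable: split of a string is never empty
  | p0 :: rest =>
    let r := rest.foldl
      (fun (acc : List Char × List Char) seg =>
        if bLastAlpha acc.2 && bHeadAlpha seg then (acc.1 ++ seg, seg)
        else (acc.1 ++ '=' :: seg, seg))
      (p0, p0)
    String.mk r.1

-- ===== PRECONDITION & SPEC =====
def Spec_clean_lemma_py (lemma_ : String) (out : String) : Prop := out = clean_lemma_py_alt lemma_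
instance (lemma_ : String) (out : String) : Decidable (Spec_clean_lemma_py lemma_ out) := by unfold Spec_clean_lemma_py; infer_instance

-- ===== CLAIM (what is proved, stated in full; the proofs are below) =====
def Claim_equal_clean_lemma_py : Prop := ∀ (lemma_ : String), Dom_clean_lemma_py lemma_ → Spec_clean_lemma_py lemma_ (clean_lemma_py lemma_)

-- ===== LEMMAS AND PROOFS =====

-- reference recursion: b = 'previous char is a letter', look one ahead for the '=' rule
def goRef (b : Bool) : List Char → List Char
  | [] => []
  | c :: rest =>
      (if c = '=' then (if b && bHeadAlpha rest then [] else ['=']) else [c])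
        ++ goRef (PySem.Chars.isalpha c) rest

-- segment-level recursion: b = 'char just before the pending "=" is a letter'
def gSeg (b : Bool) : List (List Char) → List Char
  | [] => []
  | seg :: rest =>
      (if b && bHeadAlpha seg then seg else '=' :: seg) ++ gSeg (bLastAlpha seg) rest

def lastD (b : Bool) (s : List Char) : Bool := s.getLast?.elim b PySem.Chars.isalpha

theorem lastD_false (s : List Char) : lastD false s = bLastAlpha s := rfl

theorem lastD_cons (b : Bool) (c : Char) (s : List Char) :
    lastD b (c :: s) = lastD (PySem.Chars.isalpha c) s := by
  cases s with
  | nil => rfl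
  | cons d t =>
    simp only [lastD, List.getLast?_cons_cons]
    cases h : (d :: t).getLast? with
    | none => simp [List.getLast?_eq_none_iff] at h
    | some x => rfl

theorem splitOn_ne_nil (cs : List Char) : cs.splitOn '=' ≠ [] :=
  List.splitOnP_ne_nil _ _

-- head of the first segment of the split is the head of the string (unless it is '=')
theorem headAlpha_splitOn (cs : List Char) :
    bHeadAlpha ((cs.splitOn '=').headI) = (bHeadAlpha cs && !(cs.headI = '=')) := by
  cases cs with
  | nil => simp [bHeadAlpha]
  | cons c t =>
    by_cases hc : c = '='
    · subst hc
      simp [List.splitOn, List.splitOnP_cons, bHeadAlpha, PySem.Chars.isalpha]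
    · have : (c :: t).splitOn '=' = (c :: ((t.splitOn '=').headI)) :: (t.splitOn '=').tail := by
        have h := List.splitOnP_ne_nil (fun x => x == '=') t
        simp only [List.splitOn, List.splitOnP_cons, beq_iff_eq, hc, if_neg hc]
        cases h' : t.splitOnP (fun x => x == '=') with
        | nil => exact absurd h' h
        | cons a l => simp
      simp [this, bHeadAlpha, hc]

-- the crux: the char-level recursion equals the segment-level recursion over splitOn
theorem goRef_eq_gSeg (cs : List Char) : ∀ b : Bool,
    goRef b cs = (cs.splitOn '=').headI ++ gSeg (lastD b ((cs.splitOn '=').headI)) ((cs.splitOn '=').tail) := by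
  induction cs with
  | nil => intro b; simp [goRef, gSeg, List.splitOn, List.splitOnP_nil]
  | cons c t ih =>
    intro b
    by_cases hc : c = '='
    · subst hc
      have hsplit : ('=' :: t).splitOn '=' = [] :: t.splitOn '=' := by
        simp [List.splitOn, List.splitOnP_cons]
      obtain ⟨s0, rest, hts⟩ : ∃ s0 rest, t.splitOn '=' = s0 :: rest := by
        cases h' : t.splitOn '=' with
        | nil => exact absurd h' (splitOn_ne_nil t)
        | cons a l => exact ⟨a, l, rfl⟩
      have hhead : bHeadAlpha t = bHeadAlpha s0 := by
        have := headAlpha_splitOn t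
        rw [hts] at this
        cases t with
        | nil =>
          simp [List.splitOn, List.splitOnP_nil] at hts
          simp [hts.1, bHeadAlpha]
        | cons d u =>
          by_cases hd : d = '='
          · subst hd
            have : (('=' :: u).splitOn '=') = [] :: u.splitOn '=' := by
              simp [List.splitOn, List.splitOnP_cons]
            rw [this] at hts
            cases hts
            simp only [bHeadAlpha, List.head?_cons, List.head?_nil, Option.elim]
            decide
          · simp only [List.headI] at this
            rw [this]
            simp [bHeadAlpha, List.headI, hd]
      have halpha : PySem.Chars.isalpha '=' = false := by decide
      rw [hsplit]
      simp only [List.headI, List.tail, gSeg, lastD, List.getLast?_nil, Option.elim]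
      rw [show goRef b ('=' :: t) = (if b && bHeadAlpha t then [] else ['=']) ++ goRef (PySem.Chars.isalpha '=') t from rfl]
      rw [ih, hts, halpha, hhead]
      simp only [List.headI, List.tail, lastD_false]
      simp only [gSeg]
      split_ifs <;> simp
    · obtain ⟨s0, rest, hts⟩ : ∃ s0 rest, t.splitOn '=' = s0 :: rest := by
        cases h' : t.splitOn '=' with
        | nil => exact absurd h' (splitOn_ne_nil t)
        | cons a l => exact ⟨a, l, rfl⟩
      have hsplit : (c :: t).splitOn '=' = (c :: s0) :: rest := by
        simp only [List.splitOn, List.splitOnP_cons, beq_iff_eq, if_neg hc]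
        have : t.splitOnP (fun x => x == '=') = s0 :: rest := hts
        rw [this]
        rfl
      rw [hsplit]
      simp only [List.headI, List.tail]
      rw [show goRef b (c :: t) = [c] ++ goRef (PySem.Chars.isalpha c) t from (by simp [goRef, hc])]
      rw [ih, hts]
      simp only [List.headI, List.tail]
      rw [lastD_cons]
      simp

-- A-side: previous-char-is-a-letter flag at index i
def pAl (cs : List Char) : Nat → Bool
  | 0 => false
  | j + 1 => cs[j]?.elim false PySem.Chars.isalpha

-- A-side: the index loop is goRef
theorem loop_eq_goRef (cs : List Char) : ∀ i acc, i ≤ cs.length →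
    clean_lemma_py_loop cs i acc = acc ++ goRef (pAl cs i) (cs.drop i) := by
  intro i
  induction hn : cs.length - i using Nat.strong_induction_on generalizing i with
  | _ n ih =>
    intro acc hi
    by_cases h : i < cs.length
    · rw [clean_lemma_py_loop]
      simp only [dif_pos h]
      have hdrop : cs.drop i = cs[i] :: cs.drop (i + 1) := by
        rw [List.drop_eq_getElem_cons h]
      have hc : PySem.List.pyGetD cs (i : Int) ' ' = cs[i] := by
        rw [PySem.List.pyGetD_eq_getElem cs ' ' (by omega) (by push_cast; omega)]
        simp
      have hrec : ∀ a : List Char, clean_lemma_py_loop cs (i + 1) a =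
          a ++ goRef (pAl cs (i + 1)) (cs.drop (i + 1)) :=
        fun a => ih (cs.length - (i + 1)) (by omega) (i + 1) rfl a (by omega)
      rw [hrec]
      -- identify last_c test
      have hlast : PySem.Chars.strIsalpha
          (if (i : Int) - 1 > -1 then [PySem.List.pyGetD cs ((i : Int) - 1) ' '] else []) =
          pAl cs i := by
        cases i with
        | zero => simp [pAl, PySem.Chars.strIsalpha]
        | succ j =>
          have hj : j < cs.length := by omega
          have : ((j : Int) + 1) - 1 = (j : Int) := by ring
          simp only [Nat.cast_succ, this, gt_iff_lt]
          rw [if_pos (by omega)]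
          rw [PySem.List.pyGetD_eq_getElem cs ' ' (by omega) (by push_cast; omega)]
          simp [pAl, PySem.Chars.strIsalpha, List.getElem?_eq_getElem hj, Option.elim]
      -- identify next_c test
      have hnext : PySem.Chars.strIsalpha
          (if (i : Int) + 1 < (cs.length : Int) then [PySem.List.pyGetD cs ((i : Int) + 1) ' '] else []) =
          bHeadAlpha (cs.drop (i + 1)) := by
        by_cases h1 : i + 1 < cs.length
        · rw [if_pos (by push_cast; omega)]
          rw [show ((i : Int) + 1) = ((i + 1 : Nat) : Int) from (by push_cast; ring)]
          rw [PySem.List.pyGetD_eq_getElem cs ' ' (by omega) (by push_cast; omega)]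
          have hd2 : cs.drop (i + 1) = cs[i+1] :: cs.drop (i + 2) := by
            rw [List.drop_eq_getElem_cons h1]
          rw [hd2]
          simp [PySem.Chars.strIsalpha, bHeadAlpha, List.getElem?_eq_getElem h1, Option.elim]
        · rw [if_neg (by push_cast; omega)]
          have : cs.drop (i + 1) = [] := List.drop_eq_nil_of_le (by omega)
          simp [this, PySem.Chars.strIsalpha, bHeadAlpha]
      have hnextb : pAl cs (i + 1) = PySem.Chars.isalpha cs[i] := by
        simp [pAl, List.getElem?_eq_getElem h, Option.elim]
      rw [hdrop]
      simp only [goRef, hc, hlast, hnext, hnextb]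
      by_cases hce : cs[i] = '='
      · cases hpa : pAl cs i <;> cases hh2 : bHeadAlpha (cs.drop (i + 1)) <;>
          simp [hce, hpa, hh2]
      · simp [hce]
    · have hie : i = cs.length := by omega
      rw [clean_lemma_py_loop]
      simp [h, hie, List.drop_length, goRef]

-- B-side: the foldl is gSeg
theorem foldl_eq_gSeg (rest : List (List Char)) : ∀ (out p : List Char),
    (rest.foldl
      (fun (acc : List Char × List Char) seg =>
        if bLastAlpha acc.2 && bHeadAlpha seg then (acc.1 ++ seg, seg)
        else (acc.1 ++ '=' :: seg, seg))
      (out, p)).1 = out ++ gSeg (bLastAlpha p) rest := by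
  induction rest with
  | nil => intro out p; simp [gSeg]
  | cons seg r ih =>
    intro out p
    simp only [List.foldl_cons, gSeg]
    cases hb : bLastAlpha p && bHeadAlpha seg <;>
      simp only [hb, if_true, if_false, Bool.false_eq_true, Bool.true_eq_false, ite_true, ite_false] <;>
      rw [ih] <;> simp

-- ===== VERDICT (by name: the statement is the Claim_ definition above) =====
theorem clean_lemma_py_spec : Claim_equal_clean_lemma_py := by
  intro lemma_ _
  unfold Spec_clean_lemma_py clean_lemma_py clean_lemma_py_alt
  obtain ⟨s0, rest, hs⟩ : ∃ s0 rest, lemma_.toList.splitOn '=' = s0 :: rest := by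
    cases h' : lemma_.toList.splitOn '=' with
    | nil => exact absurd h' (splitOn_ne_nil _)
    | cons a l => exact ⟨a, l, rfl⟩
  rw [loop_eq_goRef lemma_.toList 0 [] (by omega), hs]
  simp only [List.nil_append, List.drop_zero]
  rw [show pAl lemma_.toList 0 = false from rfl]
  rw [goRef_eq_gSeg lemma_.toList false, hs]
  simp only [List.headI, List.tail, lastD_false]
  rw [foldl_eq_gSeg rest s0 s0]
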